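-- pv_equiv track=rewrite | github.com/h-ram/codeforces | contests/1085/C.py | best_oneside
-- ===== SOURCE A (Python) =====
-- def best_oneside(array, h):
-- 	n = len(array)
-- 	best = [0] * (n + 1)
-- 	for drain in range(n):
-- 		current = 0
-- 		highest = 0
--
-- 		for left in range(drain, -1, -1):
-- 			highest = max(highest, array[left])
-- 			current += h - highest
--
-- 		best[drain + 1] = max(best[drain + 1], current)
-- 		highest = array[drain]
-- 		for right in range(drain + 1, n):
-- 			highest = max(highest, array[right])
-- 			current += h - highest
-- 			best[right + 1] = max(best[right + 1], current)
--
-- 	return best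
-- ===== SOURCE B (Python) =====
-- def best_oneside(array, h):
--     n = len(array)
--     # clamp at 0 once: the original's left scan starts its running max at 0
--     ap = [x if x > 0 else 0 for x in array]
--     # leftsum[d] = water sum over [0..d] with drain at d, via previous-greater DP
--     leftsum = []
--     for d in range(n):
--         p = d - 1
--         while p >= 0 and ap[p] <= ap[d]:
--             p -= 1
--         if p < 0:
--             leftsum.append((d + 1) * (h - ap[d]))
--         else:
--             leftsum.append(leftsum[p] + (d - p) * (h - ap[d]))
--     best = [0] * (n + 1)
--     for drain in range(n):
--         current = leftsum[drain]
--         best[drain + 1] = max(best[drain + 1], current)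
--         highest = array[drain]
--         for right in range(drain + 1, n):
--             highest = max(highest, array[right])
--             current += h - highest
--             best[right + 1] = max(best[right + 1], current)
--     return best
-- ===== Notes on version B (the rewrite author's own statement) =====
-- stated objective: alternative
-- what changed: The per-drain backward max-accumulating scan is replaced by a previous-greater-element dynamic program: each drain's left water sum is obtained in closed form from the sum at its previous strictly-greater (0-clamped) element, so the left side is computed by one DP pass instead of n backward rescans; the right double loop is kept.
import Mathlib
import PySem

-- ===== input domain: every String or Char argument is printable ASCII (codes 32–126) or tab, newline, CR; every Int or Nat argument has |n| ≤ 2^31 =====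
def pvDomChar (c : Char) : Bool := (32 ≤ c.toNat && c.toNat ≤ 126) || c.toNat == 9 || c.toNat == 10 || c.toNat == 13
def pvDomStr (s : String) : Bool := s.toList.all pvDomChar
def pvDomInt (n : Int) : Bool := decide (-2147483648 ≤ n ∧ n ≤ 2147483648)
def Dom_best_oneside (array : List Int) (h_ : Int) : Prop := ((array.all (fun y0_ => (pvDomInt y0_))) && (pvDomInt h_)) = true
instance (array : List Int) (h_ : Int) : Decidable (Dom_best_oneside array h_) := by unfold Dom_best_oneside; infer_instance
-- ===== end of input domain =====

-- B replaces the per-drain backward max-scan by a previous-greater-element DP for the left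
-- water sums (same values, different decomposition); return values proved equal on all inputs.

-- ===== PORT A =====
def best_oneside (array : List Int) (h_ : Int) : List Int :=
  let n : Int := (array.length : Int)
  let best : List Int := List.replicate (array.length + 1) 0
  (PySem.List.pyRange 0 n 1).foldl (fun best drain =>
    let ch := (PySem.List.pyRange drain (-1) (-1)).foldl
        (fun (s : Int × Int) left =>
          let highest := max s.2 (PySem.List.pyGetD array left 0)
          (s.1 + (h_ - highest), highest)) ((0 : Int), (0 : Int))
    let current := ch.1
    let best1 := PySem.List.pySetD best (drain + 1)
        (max (PySem.List.pyGetD best (drain + 1) 0) current)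
    let r := (PySem.List.pyRange (drain + 1) n 1).foldl
        (fun (s : List Int × Int × Int) right =>
          let highest := max s.2.2 (PySem.List.pyGetD array right 0)
          let current := s.2.1 + (h_ - highest)
          (PySem.List.pySetD s.1 (right + 1)
              (max (PySem.List.pyGetD s.1 (right + 1) 0) current), current, highest))
        (best1, current, PySem.List.pyGetD array drain 0)
    r.1) best

-- ===== PORT B =====
-- port of Source B's while loop 'p = d-1; while p >= 0 and ap[p] <= ap[d]: p -= 1' (argument = p+1)
def altFindP (ap : List Int) (v : Int) : Nat → Int
  | 0 => -1
  | k + 1 => if ap.getD k 0 ≤ v then altFindP ap v k else (k : Int)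

def best_oneside_alt (array : List Int) (h_ : Int) : List Int :=
  let n := array.length
  let ap := array.map (fun x => if x > 0 then x else 0)
  let leftsum := (List.range n).foldl (fun ls d =>
      let p := altFindP ap (ap.getD d 0) d
      if p < 0 then ls ++ [((d : Int) + 1) * (h_ - ap.getD d 0)]
      else ls ++ [ls.getD p.toNat 0 + ((d : Int) - p) * (h_ - ap.getD d 0)]) []
  let best : List Int := List.replicate (n + 1) 0
  (List.range n).foldl (fun best drain =>
    let current := leftsum.getD drain 0
    let best1 := best.set (drain + 1) (max (best.getD (drain + 1) 0) current)
    let r := (List.range' (drain + 1) (n - (drain + 1))).foldl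
        (fun (s : List Int × Int × Int) right =>
          let highest := max s.2.2 (array.getD right 0)
          let current := s.2.1 + (h_ - highest)
          (s.1.set (right + 1) (max (s.1.getD (right + 1) 0) current), current, highest))
        (best1, current, array.getD drain 0)
    r.1) best

-- ===== PRECONDITION & SPEC =====
def Spec_best_oneside (array : List Int) (h_ : Int) (out : List Int) : Prop := out = best_oneside_alt array h_
instance (array : List Int) (h_ : Int) (out : List Int) : Decidable (Spec_best_oneside array h_ out) := by unfold Spec_best_oneside; infer_instance

-- ===== CLAIM (what is proved, stated in full; the proofs are below) =====
def Claim_equal_best_oneside : Prop := ∀ (array : List Int) (h_ : Int), Dom_best_oneside array h_ → Spec_best_oneside array h_ (best_oneside array h_)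

-- ===== LEMMAS AND PROOFS =====

-- A's backward left scan, as a structural recursion on the lowest index still to process.
def goA (a : List Int) (h_ : Int) : Nat → Int × Int → Int × Int
  | 0, s => (s.1 + (h_ - max s.2 (a.getD 0 0)), max s.2 (a.getD 0 0))
  | l + 1, s => goA a h_ l (s.1 + (h_ - max s.2 (a.getD (l + 1) 0)), max s.2 (a.getD (l + 1) 0))

theorem pyfold_eq_goA (a : List Int) (h_ : Int) (l : Nat) (s : Int × Int) :
    (PySem.List.pyRange (l : Int) (-1) (-1)).foldl
        (fun (s : Int × Int) left =>
          let highest := max s.2 (PySem.List.pyGetD a left 0)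
          (s.1 + (h_ - highest), highest)) s = goA a h_ l s := by
  induction l generalizing s with
  | zero =>
    simp only [Nat.cast_zero]
    rw [PySem.List.pyRange_neg_one_cons (by norm_num)]
    rw [show (0 : Int) - 1 = -1 by ring, PySem.List.pyRange_neg_one_eq_nil le_rfl]
    simp [goA, PySem.List.pyGetD_zero, List.getD]
  | succ l ih =>
    rw [PySem.List.pyRange_neg_one_cons (by push_cast; omega)]
    have h1 : ((l + 1 : Nat) : Int) - 1 = (l : Int) := by push_cast; ring
    have h2 : ((l : Int)) + 1 = ((l + 1 : Nat) : Int) := by push_cast; ring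
    simp only [h1, List.foldl_cons, ih]
    rw [PySem.List.pyGetD_natCast]
    simp [goA, List.getD]

theorem goA_shift (a : List Int) (h_ : Int) (l : Nat) (cur hi : Int) :
    goA a h_ l (cur, hi) = (cur + (goA a h_ l (0, hi)).1, (goA a h_ l (0, hi)).2) := by
  induction l generalizing cur hi with
  | zero => simp [goA]
  | succ l ih =>
    simp only [goA]
    rw [ih, ih (0 + (h_ - max hi (a.getD (l + 1) 0)))]
    exact Prod.ext (by ring) rfl

theorem goA_run (a : List Int) (h_ : Int) (v : Int) (c m : Nat) (cur : Int)
    (hle : ∀ j : Nat, m < j → j ≤ m + c → a.getD j 0 ≤ v) :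
    goA a h_ (m + c) (cur, v) = goA a h_ m (cur + (c : Int) * (h_ - v), v) := by
  induction c generalizing cur with
  | zero => simp
  | succ c ih =>
    have hidx : a.getD (m + c + 1) 0 ≤ v := hle (m + c + 1) (by omega) (by omega)
    have hmax : max v (a.getD (m + c + 1) 0) = v := max_eq_left hidx
    have : m + (c + 1) = (m + c) + 1 := by omega
    rw [this]
    show goA a h_ (m + c) _ = _
    rw [hmax, ih (cur + (h_ - v)) (fun j h1 h2 => hle j h1 (by omega))]
    congr 2
    push_cast
    ring

theorem goA_no_p (a : List Int) (h_ : Int) (d : Nat)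
    (hall : ∀ j : Nat, j < d → a.getD j 0 ≤ max (a.getD d 0) 0) :
    (goA a h_ d (0, 0)).1 = ((d : Int) + 1) * (h_ - max (a.getD d 0) 0) := by
  set v := max (a.getD d 0) 0 with hv
  have hv0 : (0 : Int) ≤ v := le_max_right _ _
  cases d with
  | zero =>
    simp only [goA, max_comm (0 : Int) _, ← hv]
    push_cast; ring
  | succ e =>
    have h1 : goA a h_ (e + 1) ((0 : Int), (0 : Int))
        = goA a h_ e (0 + (h_ - v), v) := by
      simp only [goA, max_comm (0 : Int) _, ← hv]
    rw [h1]
    have h2 := goA_run a h_ v e 0 (0 + (h_ - v))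
      (fun j hj1 hj2 => hall j (by omega))
    simp only [Nat.zero_add] at h2
    rw [h2]
    have h3 : max v (a.getD 0 0) = v := max_eq_left (hall 0 (by omega))
    simp only [goA, h3]
    push_cast; ring

theorem goA_p (a : List Int) (h_ : Int) (d p : Nat) (hpd : p < d)
    (hgt : max (a.getD d 0) 0 < max (a.getD p 0) 0)
    (hrun : ∀ j : Nat, p < j → j < d → a.getD j 0 ≤ max (a.getD d 0) 0) :
    (goA a h_ d (0, 0)).1
      = (goA a h_ p (0, 0)).1 + ((d : Int) - (p : Int)) * (h_ - max (a.getD d 0) 0) := by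
  set v := max (a.getD d 0) 0 with hv
  have hv0 : (0 : Int) ≤ v := le_max_right _ _
  have hap : v < a.getD p 0 := by
    rcases max_cases (a.getD p 0) (0 : Int) with ⟨he, h2⟩ | ⟨he, h2⟩ <;>
      rw [he] at hgt <;> omega
  cases d with
  | zero => omega
  | succ e =>
    have hpe : p ≤ e := by omega
    have h1 : goA a h_ (e + 1) ((0 : Int), (0 : Int))
        = goA a h_ e (0 + (h_ - v), v) := by
      simp only [goA, max_comm (0 : Int) _, ← hv]
    have h2 := goA_run a h_ v (e - p) p (0 + (h_ - v))
      (fun j hj1 hj2 => hrun j hj1 (by omega))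
    rw [Nat.add_sub_cancel' hpe] at h2
    have hcast : ((e - p : Nat) : Int) = (e : Int) - (p : Int) := by
      push_cast [Nat.cast_sub hpe]; ring
    have hmaxp : max v (a.getD p 0) = a.getD p 0 := max_eq_right hap.le
    have hmax0 : max (0 : Int) (a.getD p 0) = a.getD p 0 := max_eq_right (by omega)
    cases p with
    | zero =>
      rw [h1, h2]
      simp only [goA, hmaxp, hmax0, hcast]
      push_cast; ring
    | succ q =>
      rw [h1, h2]
      have hL : goA a h_ (q + 1) (0 + (h_ - v) + ((e - (q + 1) : Nat) : Int) * (h_ - v), v)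
          = goA a h_ q (0 + (h_ - v) + ((e - (q + 1) : Nat) : Int) * (h_ - v) + (h_ - a.getD (q + 1) 0), a.getD (q + 1) 0) := by
        simp only [goA, hmaxp]
      have hmax0' : max (a.getD (q + 1) 0) 0 = a.getD (q + 1) 0 := max_eq_left (by omega)
      have hR : goA a h_ (q + 1) ((0 : Int), (0 : Int))
          = goA a h_ q (0 + (h_ - a.getD (q + 1) 0), a.getD (q + 1) 0) := by
        simp only [goA, max_comm (0 : Int) _, hmax0']
      rw [hL, hR, goA_shift, goA_shift a h_ q (0 + (h_ - a.getD (q + 1) 0))]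
      simp only [hcast]
      push_cast; ring

theorem altFindP_spec (ap : List Int) (v : Int) (k : Nat) :
    (altFindP ap v k = -1 ∧ ∀ j : Nat, j < k → ap.getD j 0 ≤ v) ∨
    (∃ p : Nat, altFindP ap v k = (p : Int) ∧ p < k ∧ v < ap.getD p 0 ∧
      ∀ j : Nat, p < j → j < k → ap.getD j 0 ≤ v) := by
  induction k with
  | zero => exact Or.inl ⟨rfl, by omega⟩
  | succ k ih =>
    by_cases h : ap.getD k 0 ≤ v
    · rcases ih with ⟨h1, h2⟩ | ⟨p, h1, h2, h3, h4⟩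
      · refine Or.inl ⟨by simp only [altFindP]; rw [if_pos h, h1], ?_⟩
        intro j hj
        rcases Nat.lt_succ_iff_lt_or_eq.mp hj with hj' | hj'
        · exact h2 j hj'
        · subst hj'; exact h
      · refine Or.inr ⟨p, by simp only [altFindP]; rw [if_pos h, h1], by omega, h3, ?_⟩
        intro j hj1 hj2
        rcases Nat.lt_succ_iff_lt_or_eq.mp hj2 with hj' | hj'
        · exact h4 j hj1 hj'
        · subst hj'; exact h
    · exact Or.inr ⟨k, by simp only [altFindP]; rw [if_neg h], by omega, by omega, by omega⟩

theorem getD_map_clamp (a : List Int) (j : Nat) (hj : j < a.length) :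
    (a.map (fun x => if x > 0 then x else 0)).getD j 0 = max (a.getD j 0) 0 := by
  rw [List.getD_eq_getElem?_getD, List.getD_eq_getElem?_getD, List.getElem?_map,
      List.getElem?_eq_getElem hj]
  simp only [Option.map_some, Option.getD_some]
  rcases max_cases (a[j] : Int) (0 : Int) with ⟨he, h2⟩ | ⟨he, h2⟩ <;> rw [he] <;>
    split <;> omega

def lsStep (ap : List Int) (h_ : Int) (ls : List Int) (d : Nat) : List Int :=
  let p := altFindP ap (ap.getD d 0) d
  if p < 0 then ls ++ [((d : Int) + 1) * (h_ - ap.getD d 0)]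
  else ls ++ [ls.getD p.toNat 0 + ((d : Int) - p) * (h_ - ap.getD d 0)]

theorem leftsum_spec (a : List Int) (h_ : Int) (k : Nat) (hk : k ≤ a.length) :
    ((List.range k).foldl (lsStep (a.map (fun x => if x > 0 then x else 0)) h_) []).length = k ∧
    ∀ d : Nat, d < k →
      ((List.range k).foldl (lsStep (a.map (fun x => if x > 0 then x else 0)) h_) []).getD d 0
        = (goA a h_ d (0, 0)).1 := by
  set ap := a.map (fun x => if x > 0 then x else 0) with hap
  induction k with
  | zero => exact ⟨rfl, by omega⟩
  | succ k ih =>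
    obtain ⟨ihlen, ihval⟩ := ih (by omega)
    have hklen : k < a.length := by omega
    have hapk : ap.getD k 0 = max (a.getD k 0) 0 := getD_map_clamp a k hklen
    set G := (List.range k).foldl (lsStep ap h_) [] with hG
    have hstep : (List.range (k + 1)).foldl (lsStep ap h_) [] = lsStep ap h_ G k := by
      rw [List.range_succ, List.foldl_append, List.foldl_cons, List.foldl_nil]
    have hval : (List.range (k + 1)).foldl (lsStep ap h_) [] = G ++ [(goA a h_ k (0, 0)).1] := by
      rcases altFindP_spec ap (ap.getD k 0) k with ⟨h1, h2⟩ | ⟨p, h1, h2, h3, h4⟩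
      · have hall : ∀ j : Nat, j < k → a.getD j 0 ≤ max (a.getD k 0) 0 := by
          intro j hj
          have hj' := h2 j hj
          rw [getD_map_clamp a j (by omega), hapk] at hj'
          exact le_trans (le_max_left _ _) hj'
        rw [hstep]
        simp only [lsStep]
        rw [h1, if_pos (show (-1 : Int) < 0 by norm_num), hapk, goA_no_p a h_ k hall]
      · have hgt : max (a.getD k 0) 0 < max (a.getD p 0) 0 := by
          rw [← hapk, ← getD_map_clamp a p (by omega)]; exact h3
        have hrun : ∀ j : Nat, p < j → j < k → a.getD j 0 ≤ max (a.getD k 0) 0 := by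
          intro j hj1 hj2
          have hj' := h4 j hj1 hj2
          rw [getD_map_clamp a j (by omega), hapk] at hj'
          exact le_trans (le_max_left _ _) hj'
        rw [hstep]
        simp only [lsStep]
        have hnn : ¬ ((p : Int) < 0) := by omega
        have htoNat : ((p : Int)).toNat = p := Int.toNat_natCast p
        rw [h1, if_neg hnn, htoNat, ihval p h2, hapk,
            ← goA_p a h_ k p h2 hgt hrun]
    refine ⟨by rw [hval]; simp [ihlen], ?_⟩
    intro d hd
    rcases Nat.lt_succ_iff_lt_or_eq.mp hd with hd' | hd'
    · rw [hval, List.getD_append _ _ _ _ (by omega), ihval d hd']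
    · subst hd'
      rw [hval]
      have hdg : d = G.length := by omega
      rw [hdg, List.getD_eq_getElem?_getD, List.getElem?_append_right (by omega)]
      simp

theorem right_fold_eq (a : List Int) (h_ : Int) (k : Nat) (s : List Int × Int × Int) :
    (List.foldl
        (fun (s : List Int × Int × Int) right =>
          (PySem.List.pySetD s.1 (right + 1)
              (max (PySem.List.pyGetD s.1 (right + 1) 0)
                (s.2.1 + (h_ - max s.2.2 (PySem.List.pyGetD a right 0)))),
            s.2.1 + (h_ - max s.2.2 (PySem.List.pyGetD a right 0)),
            max s.2.2 (PySem.List.pyGetD a right 0)))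
        s (PySem.List.pyRange ((k + 1 : Nat) : Int) ((a.length : Nat) : Int) 1))
      = (List.foldl
        (fun (s : List Int × Int × Int) right =>
          (s.1.set (right + 1)
              (max (s.1.getD (right + 1) 0) (s.2.1 + (h_ - max s.2.2 (a.getD right 0)))),
            s.2.1 + (h_ - max s.2.2 (a.getD right 0)), max s.2.2 (a.getD right 0)))
        s (List.range' (k + 1) (a.length - (k + 1)))) := by
  rw [PySem.List.pyRange_one, List.range'_eq_map_range, List.foldl_map, List.foldl_map]
  have hm : (((a.length : Nat) : Int) - ((k + 1 : Nat) : Int)).toNat = a.length - (k + 1) := by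
    omega
  rw [hm]
  apply PySem.List.foldl_congr_mem
  intro s j hj
  have h1 : ((k + 1 : Nat) : Int) + (j : Int) = ((k + 1 + j : Nat) : Int) := by push_cast; ring
  simp only [h1]
  have h2 : ((k + 1 + j : Nat) : Int) + 1 = ((k + 1 + j + 1 : Nat) : Int) := by push_cast; ring
  simp only [h2, PySem.List.pyGetD_natCast, PySem.List.pySetD_natCast]

theorem leftsum_getD (a : List Int) (h_ : Int) (k : Nat) (hk : k < a.length) :
    ((List.range a.length).foldl (fun (ls : List Int) (d : Nat) =>
        let p := altFindP (a.map (fun x => if x > 0 then x else 0))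
            ((a.map (fun x => if x > 0 then x else 0)).getD d 0) d
        if p < 0 then ls ++ [((d : Int) + 1) * (h_ - (a.map (fun x => if x > 0 then x else 0)).getD d 0)]
        else ls ++ [ls.getD p.toNat 0 + ((d : Int) - p) * (h_ - (a.map (fun x => if x > 0 then x else 0)).getD d 0)]) []).getD k 0
      = (goA a h_ k (0, 0)).1 :=
  (leftsum_spec a h_ a.length le_rfl).2 k hk

theorem ports_eq (a : List Int) (h_ : Int) : best_oneside a h_ = best_oneside_alt a h_ := by
  simp only [best_oneside, best_oneside_alt]
  rw [PySem.List.pyRange_zero_natCast, List.foldl_map]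
  apply PySem.List.foldl_congr_mem
  intro best k hk
  have hkn : k < a.length := List.mem_range.mp hk
  rw [pyfold_eq_goA, leftsum_getD a h_ k hkn]
  have h1 : (k : Int) + 1 = ((k + 1 : Nat) : Int) := by push_cast; ring
  simp only [h1, PySem.List.pyGetD_natCast, PySem.List.pySetD_natCast]
  rw [right_fold_eq a h_ k]

-- ===== VERDICT (by name: the statement is the Claim_ definition above) =====
theorem best_oneside_spec : Claim_equal_best_oneside := by
  unfold Claim_equal_best_oneside Spec_best_oneside
  intro a h_ _
  exact ports_eq a h_
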